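-- pv_equiv track=rewrite | github.com/luziyangz/you-where | archive/2026-03-26/app.py | _gutendex_pick_text_url
-- ===== SOURCE A (Python) =====
-- from typing import Any, Dict, List, Optional
--
-- def _gutendex_pick_text_url(formats: Dict[str, str]) -> Optional[str]:
--     """
--     从 Gutendex formats 中选择最适合的纯文本链接。
--     规则：优先 text/plain（尽量避开 .zip），其次兼容带 charset 的 key。
--     """
--     if not formats:
--         return None
--
--     candidates: List[str] = []
--     for k, v in formats.items():
--         lk = (k or "").lower()
--         if not v:
--             continue
--         if lk.startswith("text/plain"):
--             candidates.append(v)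
--
--     if not candidates:
--         return None
--
--     def score(u: str) -> int:
--         lu = u.lower()
--         s = 0
--         if ".zip" in lu:
--             s -= 10
--         if lu.endswith(".txt"):
--             s += 3
--         if "utf-8" in lu or "utf8" in lu:
--             s += 1
--         return s
--
--     candidates.sort(key=score, reverse=True)
--     return candidates[0]
-- ===== SOURCE B (Python) =====
-- from typing import Dict, Optional
--
--
-- def _gutendex_pick_text_url(formats: Dict[str, str]) -> Optional[str]:
--     """Single pass: track the best-scoring text/plain URL; strict-greater
--     updates keep the first-seen URL on ties (matching a stable sort)."""
--     best_url: Optional[str] = None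
--     best_score = 0
--     for k, v in formats.items():
--         if not v or not k.lower().startswith("text/plain"):
--             continue
--         lu = v.lower()
--         s = 0
--         if ".zip" in lu:
--             s -= 10
--         if lu.endswith(".txt"):
--             s += 3
--         if "utf-8" in lu or "utf8" in lu:
--             s += 1
--         if best_url is None or s > best_score:
--             best_url, best_score = v, s
--     return best_url
-- ===== Notes on version B (the rewrite author's own statement) =====
-- stated objective: simpler
-- what changed: Replaces the collect-then-stable-sort-then-take-head pipeline with a single pass over the dict that keeps a running best URL and score, updating only on a strictly greater score so ties keep the first-seen URL.
import Mathlib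
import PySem

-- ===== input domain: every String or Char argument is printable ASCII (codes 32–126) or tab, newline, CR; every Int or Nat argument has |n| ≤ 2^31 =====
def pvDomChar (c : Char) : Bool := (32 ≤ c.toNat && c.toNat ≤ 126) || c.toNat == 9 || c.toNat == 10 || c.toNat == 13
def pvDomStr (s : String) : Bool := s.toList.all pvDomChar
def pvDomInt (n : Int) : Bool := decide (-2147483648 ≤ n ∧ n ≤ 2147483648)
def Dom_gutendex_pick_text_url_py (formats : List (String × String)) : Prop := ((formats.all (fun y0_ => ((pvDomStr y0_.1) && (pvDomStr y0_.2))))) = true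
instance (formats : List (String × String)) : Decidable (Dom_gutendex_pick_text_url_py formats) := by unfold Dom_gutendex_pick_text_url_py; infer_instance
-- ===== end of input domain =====

-- B replaces A's collect → stable-sort(desc) → head pipeline by one pass keeping the best URL
-- (strict-greater updates, so ties keep the first-seen URL); objective: simpler.

-- ===== PORT A =====
-- the inner 'def score(u)' of A
def pvScoreA (u : String) : Int :=
  let lu := PySem.Str.lower u
  let s : Int := 0
  let s := if PySem.Str.isIn ".zip" lu then s - 10 else s
  let s := if PySem.Str.endswith lu ".txt" then s + 3 else s
  let s := if PySem.Str.isIn "utf-8" lu || PySem.Str.isIn "utf8" lu then s + 1 else s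
  s

def gutendex_pick_text_url_py (formats : List (String × String)) : Option String :=
  if formats = [] then none
  else
    -- the 'for k, v in formats.items(): …' loop building candidates
    let candidates : List String := formats.foldl (fun acc kv =>
      let lk := PySem.Str.lower (if kv.1 = "" then "" else kv.1)  -- (k or "").lower()
      if kv.2 = "" then acc
      else if PySem.Str.startswith lk "text/plain" then acc ++ [kv.2]
      else acc) []
    if candidates = [] then none
    else (PySem.List.sorted candidates pvScoreA true).head?   -- candidates.sort(key=score, reverse=True); candidates[0]

-- ===== PORT B =====
-- Source B's inline score computation for v
def pvScoreB (v : String) : Int :=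
  let lu := PySem.Str.lower v
  let s : Int := 0
  let s := if PySem.Str.isIn ".zip" lu then s - 10 else s
  let s := if PySem.Str.endswith lu ".txt" then s + 3 else s
  let s := if PySem.Str.isIn "utf-8" lu || PySem.Str.isIn "utf8" lu then s + 1 else s
  s

def gutendex_pick_text_url_py_alt (formats : List (String × String)) : Option String :=
  -- state (best_url, best_score) with best_url = None encoded as Option on the pair
  (formats.foldl (fun (st : Option (String × Int)) kv =>
      if kv.2 = "" ∨ ¬ (PySem.Str.startswith (PySem.Str.lower kv.1) "text/plain" = true) then st
      else
        let s := pvScoreB kv.2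
        match st with
        | none => some (kv.2, s)
        | some (bu, bs) => if bs < s then some (kv.2, s) else some (bu, bs))
    none).map Prod.fst

-- ===== PRECONDITION & SPEC =====
def Spec_gutendex_pick_text_url_py (formats : List (String × String)) (out : Option String) : Prop := out = gutendex_pick_text_url_py_alt formats
instance (formats : List (String × String)) (out : Option String) : Decidable (Spec_gutendex_pick_text_url_py formats out) := by unfold Spec_gutendex_pick_text_url_py; infer_instance

-- ===== CLAIM (what is proved, stated in full; the proofs are below) =====
def Claim_equal_gutendex_pick_text_url_py : Prop := ∀ (formats : List (String × String)), Dom_gutendex_pick_text_url_py formats → Spec_gutendex_pick_text_url_py formats (gutendex_pick_text_url_py formats)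

-- ===== LEMMAS AND PROOFS =====

-- the keep-test both loops apply, as one predicate
def pvKeep (kv : String × String) : Bool :=
  !(kv.2 = "") && PySem.Str.startswith (PySem.Str.lower kv.1) "text/plain"

-- the skip condition of B's loop is exactly 'not kept'
theorem pvSkip_iff (kv : String × String) :
    (kv.2 = "" ∨ ¬ (PySem.Str.startswith (PySem.Str.lower kv.1) "text/plain" = true)) ↔ pvKeep kv = false := by
  simp only [pvKeep, Bool.and_eq_false_iff, Bool.not_eq_true', Bool.not_eq_true]
  constructor
  · rintro (h | h)
    · exact Or.inl (by simp [h])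
    · exact Or.inr h
  · rintro (h | h)
    · exact Or.inl (by simpa using h)
    · exact Or.inr h

-- head of inserting x into a rev-sorted accumulator: x wins only on strictly greater score
theorem head?_insertBy_score (x : String) (acc : List String) :
    (PySem.List.insertBy (fun a b => decide (pvScoreA b < pvScoreA a)) x acc).head? =
      match acc.head? with
      | none => some x
      | some m => if pvScoreA m < pvScoreA x then some x else some m := by
  cases acc with
  | nil => simp [PySem.List.insertBy]
  | cons y ys =>
    simp only [PySem.List.insertBy, List.head?_cons]
    by_cases h : pvScoreA y < pvScoreA x <;> simp [h]

-- running-best invariant: B's fold state over candidate urls mirrors the head of A's insertion fold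
theorem best_eq_head_foldl (cs : List String) (acc : List String)
    (st : Option (String × Int)) (hst : st = acc.head?.map (fun m => (m, pvScoreA m))) :
    (cs.foldl (fun st u =>
        match st with
        | none => some (u, pvScoreA u)
        | some (bu, bs) => if bs < pvScoreA u then some (u, pvScoreA u) else some (bu, bs)) st).map Prod.fst
    = (cs.foldl (fun a x => PySem.List.insertBy (fun a b => decide (pvScoreA b < pvScoreA a)) x a) acc).head? := by
  induction cs generalizing acc st with
  | nil =>
    subst hst; cases acc <;> simp
  | cons c cs ih =>
    simp only [List.foldl_cons]
    apply ih
    rw [head?_insertBy_score]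
    subst hst
    cases acc with
    | nil => simp
    | cons y ys =>
      by_cases h : pvScoreA y < pvScoreA c <;> simp [h]

-- B's fold over formats is the running-best fold over the filtered candidate urls
theorem altFold_eq_fold_filter (fs : List (String × String)) (st : Option (String × Int)) :
    fs.foldl (fun (st : Option (String × Int)) kv =>
      if kv.2 = "" ∨ ¬ (PySem.Str.startswith (PySem.Str.lower kv.1) "text/plain" = true) then st
      else
        let s := pvScoreB kv.2
        match st with
        | none => some (kv.2, s)
        | some (bu, bs) => if bs < s then some (kv.2, s) else some (bu, bs)) st
    = ((fs.filter pvKeep).map Prod.snd).foldl (fun st u =>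
        match st with
        | none => some (u, pvScoreA u)
        | some (bu, bs) => if bs < pvScoreA u then some (u, pvScoreA u) else some (bu, bs)) st := by
  induction fs generalizing st with
  | nil => rfl
  | cons kv fs ih =>
    simp only [List.foldl_cons, List.filter_cons]
    by_cases hkeep : pvKeep kv = true
    · have hc : ¬ (kv.2 = "" ∨ ¬ (PySem.Str.startswith (PySem.Str.lower kv.1) "text/plain" = true)) := by
        rw [pvSkip_iff]; simp [hkeep]
      rw [if_neg hc, if_pos hkeep]
      simp only [List.map_cons, List.foldl_cons]
      exact ih _
    · have hc : kv.2 = "" ∨ ¬ (PySem.Str.startswith (PySem.Str.lower kv.1) "text/plain" = true) :=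
        (pvSkip_iff kv).mpr (by simpa using hkeep)
      rw [if_pos hc, if_neg hkeep]
      exact ih st

-- A's candidate-building loop is filter-then-project
theorem candidates_eq (fs : List (String × String)) :
    fs.foldl (fun acc kv =>
      let lk := PySem.Str.lower (if kv.1 = "" then "" else kv.1)
      if kv.2 = "" then acc
      else if PySem.Str.startswith lk "text/plain" then acc ++ [kv.2]
      else acc) []
    = (fs.filter pvKeep).map Prod.snd := by
  have hshape : ∀ kv : String × String,
      (fun acc => let lk := PySem.Str.lower (if kv.1 = "" then "" else kv.1)
        if kv.2 = "" then acc
        else if PySem.Str.startswith lk "text/plain" then acc ++ [kv.2]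
        else acc)
      = (fun (acc : List String) => if pvKeep kv then acc ++ [kv.2] else acc) := by
    intro kv
    funext acc
    by_cases h1 : kv.1 = ""
    · by_cases h2 : kv.2 = "" <;> simp [pvKeep, h1, h2]
    · by_cases h2 : kv.2 = "" <;> simp [pvKeep, h1, h2]
  calc fs.foldl (fun acc kv =>
      let lk := PySem.Str.lower (if kv.1 = "" then "" else kv.1)
      if kv.2 = "" then acc
      else if PySem.Str.startswith lk "text/plain" then acc ++ [kv.2]
      else acc) []
      = fs.foldl (fun acc kv => if pvKeep kv then acc ++ [kv.2] else acc) [] := by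
        congr 1; funext acc kv; exact congrFun (hshape kv) acc
    _ = (fs.filter pvKeep).map Prod.snd := by
        simpa using PySem.List.foldl_append_if pvKeep Prod.snd fs []

-- ===== VERDICT (by name: the statement is the Claim_ definition above) =====
theorem gutendex_pick_text_url_py_spec : Claim_equal_gutendex_pick_text_url_py := by
  intro formats _
  unfold Spec_gutendex_pick_text_url_py gutendex_pick_text_url_py gutendex_pick_text_url_py_alt
  rw [altFold_eq_fold_filter, best_eq_head_foldl _ [] none rfl]
  rw [candidates_eq]
  rw [← PySem.List.sorted_rev_eq_foldl_insertBy]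
  have hnil : PySem.List.sorted ([] : List String) pvScoreA true = [] := rfl
  by_cases hf : formats = []
  · simp [hf, hnil]
  · simp only [hf, if_false]
    by_cases hc : (formats.filter pvKeep).map Prod.snd = []
    · simp [hc, hnil]
    · simp [hc]
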